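-- pv_equiv track=rewrite | github.com/csaumenig/adventofcode | python/2015/aoc2015day17.py | get_containers_by_total
-- ===== SOURCE A (Python) =====
-- def get_containers_by_total(my_list: list[int],
--                             target: int) -> list[list[int]]:
--     from itertools import combinations
--     results: list[list[int]] = []
--     for r in range(1, len(my_list) + 1):  # Iterate through combination lengths
--         for combo in combinations(my_list, r):
--             if sum(combo) == target:
--                 results.append(list(combo))
--     return results
-- ===== SOURCE B (Python) =====
-- def get_containers_by_total(my_list: list[int],
--                             target: int) -> list[list[int]]:
--     # One depth-first walk over include/exclude decisions with a running sum,
--     # then group the hits by length (shortest first) to match length order.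
--     def dfs(rest, chosen, s):
--         if not rest:
--             return [chosen] if s == target and chosen else []
--         x = rest[0]
--         return dfs(rest[1:], chosen + [x], s + x) + dfs(rest[1:], chosen, s)
--     found = dfs(my_list, [], 0)
--     return [c for r in range(1, len(my_list) + 1)
--             for c in found if len(c) == r]
-- ===== Notes on version B (the rewrite author's own statement) =====
-- stated objective: alternative
-- what changed: Replaces the per-length itertools.combinations sweeps (length-1 combinations, then length-2, ..., re-summing every tuple) by a single include/exclude DFS over the list that carries a running sum and collects all hits once, then groups the hits by length.
import Mathlib
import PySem

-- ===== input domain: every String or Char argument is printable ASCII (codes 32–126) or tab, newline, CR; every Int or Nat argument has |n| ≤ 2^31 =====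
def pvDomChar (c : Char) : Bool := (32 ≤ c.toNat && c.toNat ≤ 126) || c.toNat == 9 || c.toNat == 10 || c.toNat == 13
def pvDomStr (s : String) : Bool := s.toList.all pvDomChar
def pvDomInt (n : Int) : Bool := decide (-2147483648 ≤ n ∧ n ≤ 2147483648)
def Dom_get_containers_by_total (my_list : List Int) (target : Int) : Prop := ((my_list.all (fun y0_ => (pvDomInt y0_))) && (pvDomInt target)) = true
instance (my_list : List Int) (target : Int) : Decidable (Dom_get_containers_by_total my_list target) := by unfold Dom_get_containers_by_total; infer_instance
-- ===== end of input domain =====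

-- B replaces A's per-length itertools.combinations sweeps by a single include/exclude DFS
-- with a running sum, grouping the hits by length afterwards (alternative algorithm, same results).

-- ===== PORT A =====
-- itertools.combinations(my_list, r) in its documented emission order (lexicographic in positions)
def pyCombinations : List Int → Nat → List (List Int)
  | _, 0 => [[]]
  | [], _ + 1 => []
  | x :: xs, r + 1 => (pyCombinations xs r).map (fun c => x :: c) ++ pyCombinations xs (r + 1)

def get_containers_by_total (my_list : List Int) (target : Int) : List (List Int) :=
  (List.range' 1 my_list.length).foldl (fun results r =>
    (pyCombinations my_list r).foldl (fun results combo =>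
      if combo.sum = target then results ++ [combo] else results) results) []

-- ===== PORT B =====
def gcbtDfs (target : Int) : List Int → List Int → Int → List (List Int)
  | [], chosen, s => if s = target ∧ chosen ≠ [] then [chosen] else []
  | x :: rest, chosen, s =>
      gcbtDfs target rest (chosen ++ [x]) (s + x) ++ gcbtDfs target rest chosen s

def get_containers_by_total_alt (my_list : List Int) (target : Int) : List (List Int) :=
  let found := gcbtDfs target my_list [] 0
  (List.range' 1 my_list.length).flatMap (fun r => found.filter (fun c => c.length = r))

-- ===== PRECONDITION & SPEC =====
def Spec_get_containers_by_total (my_list : List Int) (target : Int) (out : List (List Int)) : Prop := out = get_containers_by_total_alt my_list target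
instance (my_list : List Int) (target : Int) (out : List (List Int)) : Decidable (Spec_get_containers_by_total my_list target out) := by unfold Spec_get_containers_by_total; infer_instance

-- ===== CLAIM (what is proved, stated in full; the proofs are below) =====
def Claim_equal_get_containers_by_total : Prop := ∀ (my_list : List Int) (target : Int), Dom_get_containers_by_total my_list target → Spec_get_containers_by_total my_list target (get_containers_by_total my_list target)

-- ===== LEMMAS AND PROOFS =====

-- all subsets of xs, in include-first DFS order
def subsAll : List Int → List (List Int)
  | [] => [[]]
  | x :: xs => (subsAll xs).map (fun c => x :: c) ++ subsAll xs

theorem gcbtDfs_eq (t : Int) : ∀ (xs chosen : List Int) (s : Int),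
    gcbtDfs t xs chosen s =
      ((subsAll xs).filter (fun c => decide (s + c.sum = t ∧ (chosen ≠ [] ∨ c ≠ [])))).map
        (fun c => chosen ++ c) := by
  intro xs
  induction xs with
  | nil =>
      intro chosen s
      simp only [gcbtDfs, subsAll, List.filter_cons, List.filter_nil]
      split_ifs with h₁ h₂ h₂ <;> simp_all
  | cons x xs ih =>
      intro chosen s
      have h1 : gcbtDfs t (x :: xs) chosen s
          = gcbtDfs t xs (chosen ++ [x]) (s + x) ++ gcbtDfs t xs chosen s := rfl
      rw [h1, ih, ih]
      have h2 : subsAll (x :: xs) = (subsAll xs).map (fun c => x :: c) ++ subsAll xs := rfl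
      rw [h2, List.filter_append, List.filter_map, List.map_append, List.map_map]
      congr 1
      have hfun : ((fun c => chosen ++ c) ∘ (fun c : List Int => x :: c))
          = fun c : List Int => (chosen ++ [x]) ++ c := funext fun c => by simp
      rw [hfun]
      congr 1
      apply List.filter_congr
      intro c _
      rw [Function.comp_apply, decide_eq_decide]
      constructor
      · rintro ⟨hs, _⟩
        exact ⟨by simpa [add_assoc] using hs, Or.inr (by simp)⟩
      · rintro ⟨hs, _⟩
        exact ⟨by simpa [add_assoc] using hs, Or.inl (by simp)⟩

theorem pyCombinations_eq : ∀ (xs : List Int) (r : Nat),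
    pyCombinations xs r = (subsAll xs).filter (fun c => c.length = r) := by
  intro xs
  induction xs with
  | nil =>
      intro r
      cases r <;> simp [pyCombinations, subsAll]
  | cons x xs ih =>
      intro r
      have h2 : subsAll (x :: xs) = (subsAll xs).map (fun c => x :: c) ++ subsAll xs := rfl
      cases r with
      | zero =>
          rw [h2, List.filter_append, List.filter_map]
          have h0 : ((fun c : List Int => decide (c.length = 0)) ∘ (fun c => x :: c))
              = fun _ => false := funext fun c => by simp
          have hz : ∀ ys : List Int, pyCombinations ys 0 = [[]] := fun ys => by
            cases ys <;> rfl
          rw [h0, hz, ← ih 0, hz]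
          simp
      | succ r =>
          have h1 : pyCombinations (x :: xs) (r + 1)
              = (pyCombinations xs r).map (fun c => x :: c) ++ pyCombinations xs (r + 1) := rfl
          rw [h1, h2, List.filter_append, List.filter_map, ih, ih]
          congr 1
          apply congrArg
          apply List.filter_congr
          intro c _
          simp

theorem gcbt_flatMap_congr {α β : Type} (l : List α) (f g : α → List β)
    (h : ∀ a ∈ l, f a = g a) : l.flatMap f = l.flatMap g := by
  induction l with
  | nil => rfl
  | cons a l ih =>
      rw [List.flatMap_cons, List.flatMap_cons, h a (List.mem_cons_self ..),
        ih (fun b hb => h b (List.mem_cons_of_mem _ hb))]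

theorem gcbt_inner (my_list : List Int) (target : Int) :
    ∀ (rs : List Nat) (acc : List (List Int)),
      rs.foldl (fun results r =>
        (pyCombinations my_list r).foldl (fun results combo =>
          if combo.sum = target then results ++ [combo] else results) results) acc
      = acc ++ rs.flatMap (fun r =>
          (pyCombinations my_list r).filter (fun c => decide (c.sum = target))) := by
  intro rs
  induction rs with
  | nil => simp
  | cons r rs ih =>
      intro acc
      rw [List.foldl_cons, PySem.List.foldl_append_ite_eq_filter, ih, List.flatMap_cons,
        List.append_assoc]

theorem gcbt_key (my_list : List Int) (target : Int) (r : Nat) (hr : 1 ≤ r) :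
    (pyCombinations my_list r).filter (fun c => decide (c.sum = target))
      = (gcbtDfs target my_list [] 0).filter (fun c => c.length = r) := by
  rw [pyCombinations_eq, gcbtDfs_eq]
  simp only [List.nil_append, List.map_id', List.filter_filter]
  apply List.filter_congr
  intro c _
  by_cases hl : c.length = r
  · have hne : c ≠ [] := by
      intro h
      subst h
      simp at hl
      omega
    simp [hl, hne]
  · simp [hl]

-- ===== VERDICT (by name: the statement is the Claim_ definition above) =====
theorem get_containers_by_total_spec : Claim_equal_get_containers_by_total := by
  intro my_list target _
  unfold Spec_get_containers_by_total get_containers_by_total get_containers_by_total_alt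
  rw [gcbt_inner, List.nil_append]
  apply gcbt_flatMap_congr
  intro r hr
  exact gcbt_key my_list target r (List.mem_range'_1.mp hr).1
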